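-- pv_equiv track=rewrite | github.com/hyeongjin-kim/co_te | insa.py | solution
-- ===== SOURCE A (Python) =====
-- def solution(scores):
--     answer = 1
--     tar_a = scores[0][0] #완호의 근무태도 점수
--     tar_b = scores[0][1] #완호의 동료평가
--     tar_score = tar_a + tar_b #완호의 총점
--     scores.sort(key = lambda x : (-x[0], x[1])) #근무태도에 대해서 내림차순, 동료평가에 대해서 오름차순으로 정렬
--     max_b = 0 #최대 동료평가 점수
--
--
--     for a, b in scores:
--         if(tar_a < a and tar_b < b): #어떤 직원보다 두가지 점수가 모두 낮아 인센티브 x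
--             return -1
--         if( b >= max_b): #근무태도 점수는 앞에 높은 사람이 있음 -> 앞에서 나온 최대 동료평가(직원 X)보다 이 사람(직원 Y)의 동료평가보다 낮다 -> 직원 X의 두 점수는 직원 Y보다 높다 직원 Y는 인센티브 X
--             max_b = b
--             if(a + b > tar_score): #이사람보다 완호의 총점이 낮으므로 등수 + 1
--                 answer+=1
--     return answer
-- ===== SOURCE B (Python) =====
-- def solution(scores):
--     # Different algorithm: explicit pairwise Pareto-domination test instead of A's
--     # sorted running-max pass. Sorts scores in place with A's key (same mutation side effect).
--     tar_a = scores[0][0]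
--     tar_b = scores[0][1]
--     tar_score = tar_a + tar_b
--     scores.sort(key=lambda x: (-x[0], x[1]))
--     if any(a > tar_a and b > tar_b for a, b in scores):
--         return -1
--     rank = 1
--     for a, b in scores:
--         if a + b > tar_score and not any(c > a and d > b for c, d in scores):
--             rank += 1
--     return rank
-- ===== Notes on version B (the rewrite author's own statement) =====
-- stated objective: simpler
-- what changed: Replaces A's sort-order-dependent single pass with a running maximum by a direct pairwise Pareto-domination test: return -1 if anyone strictly dominates scores[0], else rank = 1 + number of undominated employees with a strictly larger total (the in-place sort with A's key is kept for its mutation side effect).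
-- intended difference: On inputs where nobody strictly dominates scores[0] but some employee with a NEGATIVE peer score is undominated and has a total exceeding scores[0]'s, A's running maximum starts at 0 instead of -infinity and skips exactly those employees, so A under-counts the rank; B counts them, which is the intended rank. — e.g. on solution([[0, 0], [5, -1]]): A returns 1, B returns 2
-- outside the precondition, e.g. on solution([[0, 0], [5, 5], [1, 2, 3]]): A returns -1, B returns -1
import Mathlib
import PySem

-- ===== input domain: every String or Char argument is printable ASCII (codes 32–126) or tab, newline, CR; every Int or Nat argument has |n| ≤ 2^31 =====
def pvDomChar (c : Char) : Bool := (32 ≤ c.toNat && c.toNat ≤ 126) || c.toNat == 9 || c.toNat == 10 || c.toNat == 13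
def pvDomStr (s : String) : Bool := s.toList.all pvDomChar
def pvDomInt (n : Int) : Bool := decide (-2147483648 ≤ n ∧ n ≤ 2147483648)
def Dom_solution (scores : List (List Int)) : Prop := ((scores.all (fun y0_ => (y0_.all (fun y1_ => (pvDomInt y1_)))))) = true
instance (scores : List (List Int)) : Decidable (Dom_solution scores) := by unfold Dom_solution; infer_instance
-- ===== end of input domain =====

-- B replaces A's sorted running-max pass by a direct pairwise Pareto-domination test (simpler logic,
-- same in-place sort side effect; equivalence is about the RETURN value only — both sort scores in place).
-- B intentionally differs where A's running max starting at 0 skips undominated employees with negative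
-- peer score (see D_solution below).


-- ===== PORT A =====
-- 'for a, b in scores' with running max_b and early return -1; rows that are not pairs raise
-- ValueError in Python (excluded by Pre_solution); the 0 on that arm is a dead default.
def pvLoopA (tarA tarB tarS : Int) : List (List Int) → Int → Int → Int
  | [], _, ans => ans
  | row :: rest, maxb, ans =>
    match row with
    | [a, b] =>
      if tarA < a ∧ tarB < b then -1
      else if maxb ≤ b then
        pvLoopA tarA tarB tarS rest b (if tarS < a + b then ans + 1 else ans)
      else
        pvLoopA tarA tarB tarS rest maxb ans
    | _ => 0

def solution (scores : List (List Int)) : Int :=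
  let tar_a := PySem.List.pyGetD (PySem.List.pyGetD scores 0 []) 0 0   -- scores[0][0]
  let tar_b := PySem.List.pyGetD (PySem.List.pyGetD scores 0 []) 1 0   -- scores[0][1]
  let tar_score := tar_a + tar_b
  -- scores.sort(key = lambda x : (-x[0], x[1]))
  let s := PySem.List.sorted2 scores (fun x => -(PySem.List.pyGetD x 0 0)) (fun x => PySem.List.pyGetD x 1 0)
  pvLoopA tar_a tar_b tar_score s 0 1

-- ===== PORT B =====
-- 'c > a and d > b for c, d in r' — does r strictly Pareto-dominate (a, b)?
def pvBeats (a b : Int) (r : List Int) : Bool :=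
  match r with
  | [c, d] => decide (a < c ∧ b < d)
  | _ => false

def solution_alt (scores : List (List Int)) : Int :=
  let tar_a := PySem.List.pyGetD (PySem.List.pyGetD scores 0 []) 0 0
  let tar_b := PySem.List.pyGetD (PySem.List.pyGetD scores 0 []) 1 0
  let tar := tar_a + tar_b
  let s := PySem.List.sorted2 scores (fun x => -(PySem.List.pyGetD x 0 0)) (fun x => PySem.List.pyGetD x 1 0)
  if s.any (pvBeats tar_a tar_b) then -1
  else
    s.foldl (fun rank r =>
      match r with
      | [a, b] => if tar < a + b ∧ s.any (pvBeats a b) = false then rank + 1 else rank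
      | _ => rank) 1

-- ===== PRECONDITION & SPEC =====
-- Pre_ excludes the empty list (IndexError on scores[0]) and lists with a row that is not a pair
-- (IndexError in the sort key or ValueError on unpacking); on a few such inputs A still returns -1
-- because a dominator is reached first — see the cite in claim.json.
def Pre_solution (scores : List (List Int)) : Prop :=
  scores ≠ [] ∧ ∀ r ∈ scores, r.length = 2
instance (scores : List (List Int)) : Decidable (Pre_solution scores) := by unfold Pre_solution; infer_instance

def pvWitness_solution : List (List Int) := [[1, 2], [3, 1]]

-- On inputs where nobody strictly dominates scores[0] but some employee with a NEGATIVE peer score is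
-- undominated and has a total exceeding scores[0]'s, A's running maximum starts at 0 and skips exactly
-- those employees (under-counting the rank); B counts them, which is the intended rank.
def pvAtt (r : List Int) : Int := r.getD 0 0      -- attitude score of a row
def pvPeer (r : List Int) : Int := r.getD 1 0     -- peer score of a row
-- nobody in scores strictly Pareto-dominates row r
def pvUndom (r : List Int) (scores : List (List Int)) : Prop :=
  ∀ q ∈ scores, ¬ (pvAtt r < pvAtt q ∧ pvPeer r < pvPeer q)
def D_solution (scores : List (List Int)) : Prop :=
  pvUndom (scores.headD []) scores ∧
  ∃ r ∈ scores, pvPeer r < 0 ∧ pvAtt (scores.headD []) + pvPeer (scores.headD []) < pvAtt r + pvPeer r ∧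
    pvUndom r scores
instance (scores : List (List Int)) : Decidable (D_solution scores) := by unfold D_solution pvUndom; infer_instance

def Spec_solution (scores : List (List Int)) (out : Int) : Prop := ¬ D_solution scores → out = solution_alt scores
instance (scores : List (List Int)) (out : Int) : Decidable (Spec_solution scores out) := by unfold Spec_solution; infer_instance

def pvDiffWitness_solution : List (List Int) := [[0, 0], [5, -1]]
def pvDiffWitnessOut_solution : Int × Int := (1, 2)

-- ===== CLAIM (what is proved, stated in full; the proofs are below) =====
def Claim_unchanged_solution : Prop := ∀ (scores : List (List Int)), Dom_solution scores → Pre_solution scores → Spec_solution scores (solution scores)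
def Claim_changed_solution : Prop := Dom_solution (pvDiffWitness_solution) ∧ Pre_solution (pvDiffWitness_solution) ∧ D_solution (pvDiffWitness_solution) ∧ solution (pvDiffWitness_solution) = pvDiffWitnessOut_solution.1 ∧ solution_alt (pvDiffWitness_solution) = pvDiffWitnessOut_solution.2 ∧ pvDiffWitnessOut_solution.1 ≠ pvDiffWitnessOut_solution.2
def Claim_exact_solution : Prop := ∀ (scores : List (List Int)), Dom_solution scores → Pre_solution scores → D_solution scores → solution scores ≠ solution_alt scores

-- ===== LEMMAS AND PROOFS =====

-- the sort key of both programs as one lexicographic key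
def pvKey (x : List Int) : Lex (Int × Int) :=
  toLex (-(PySem.List.pyGetD x 0 0), PySem.List.pyGetD x 1 0)

lemma pvGet0 (a b : Int) : PySem.List.pyGetD [a, b] 0 0 = a := rfl
lemma pvGet1 (a b : Int) : PySem.List.pyGetD [a, b] 1 0 = b := rfl

lemma pvKey_le {a b c d : Int} (h : pvKey [a, b] ≤ pvKey [c, d]) :
    c ≤ a ∧ (a = c → b ≤ d) := by
  simp only [pvKey, pvGet0, pvGet1, Prod.Lex.le_iff, ofLex_toLex] at h
  rcases h with h | ⟨h1, h2⟩
  · exact ⟨by omega, by omega⟩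
  · exact ⟨by omega, fun _ => h2⟩

lemma pvSorted2_eq (xs : List (List Int)) :
    PySem.List.sorted2 xs (fun x => -(PySem.List.pyGetD x 0 0)) (fun x => PySem.List.pyGetD x 1 0) =
    PySem.List.sorted xs pvKey false := by
  rw [PySem.List.sorted_eq_foldl_insertBy]
  have hdef : PySem.List.sorted2 xs (fun x => -(PySem.List.pyGetD x 0 0)) (fun x => PySem.List.pyGetD x 1 0) =
      List.foldl (fun acc x => PySem.List.insertBy
        (fun p q => decide (-(PySem.List.pyGetD p 0 0) < -(PySem.List.pyGetD q 0 0)) ||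
          (!decide (-(PySem.List.pyGetD q 0 0) < -(PySem.List.pyGetD p 0 0)) &&
            decide (PySem.List.pyGetD p 1 0 < PySem.List.pyGetD q 1 0))) x acc) [] xs := rfl
  rw [hdef]
  have hfun : (fun (p q : List Int) => decide (-(PySem.List.pyGetD p 0 0) < -(PySem.List.pyGetD q 0 0)) ||
          (!decide (-(PySem.List.pyGetD q 0 0) < -(PySem.List.pyGetD p 0 0)) &&
            decide (PySem.List.pyGetD p 1 0 < PySem.List.pyGetD q 1 0))) =
      (fun p q => decide (pvKey p < pvKey q)) := by
    funext p q
    rw [Bool.eq_iff_iff]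
    simp only [Bool.or_eq_true, Bool.and_eq_true, Bool.not_eq_true', decide_eq_true_eq,
      decide_eq_false_iff_not, pvKey, Prod.Lex.lt_iff, ofLex_toLex]
    constructor
    · rintro (h | ⟨h1, h2⟩)
      · exact Or.inl h
      · by_cases he : -(PySem.List.pyGetD p 0 0) < -(PySem.List.pyGetD q 0 0)
        · exact Or.inl he
        · exact Or.inr ⟨by omega, h2⟩
    · rintro (h | ⟨h1, h2⟩)
      · exact Or.inl h
      · exact Or.inr ⟨by omega, h2⟩
  rw [hfun]

lemma pvLen2 {r : List Int} (h : r.length = 2) : ∃ a b, r = [a, b] := by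
  match r with
  | [a, b] => exact ⟨a, b, rfl⟩

-- A's per-element counting predicate after the loop characterisation
def pvPA (s : List (List Int)) (T maxb : Int) (r : List Int) : Bool :=
  match r with
  | [a, b] => decide (maxb ≤ b) && !(s.any (pvBeats a b)) && decide (T < a + b)
  | _ => false

-- B's per-element counting predicate
def pvPB (s : List (List Int)) (T : Int) (r : List Int) : Bool :=
  match r with
  | [a, b] => decide (T < a + b) && !(s.any (pvBeats a b))
  | _ => false

lemma pvLoopA_dom (A0 B0 T : Int) (l : List (List Int))
    (h2 : ∀ r ∈ l, r.length = 2) (hd : ∃ r ∈ l, pvBeats A0 B0 r = true) :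
    ∀ maxb ans, pvLoopA A0 B0 T l maxb ans = -1 := by
  induction l with
  | nil => simp at hd
  | cons r t ih =>
    intro maxb ans
    obtain ⟨a, b, rfl⟩ := pvLen2 (h2 r List.mem_cons_self)
    unfold pvLoopA
    by_cases hbeat : A0 < a ∧ B0 < b
    · simp [hbeat]
    · have hd' : ∃ q ∈ t, pvBeats A0 B0 q = true := by
        obtain ⟨x, hx, hbx⟩ := hd
        rcases List.mem_cons.mp hx with rfl | hx
        · exact absurd (by simpa [pvBeats] using hbx) hbeat
        · exact ⟨x, hx, hbx⟩
      have ih' := ih (fun q hq => h2 q (List.mem_cons_of_mem _ hq)) hd'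
      simp only [hbeat, if_false]
      split <;> exact ih' _ _

lemma pvLoopA_nodom (A0 B0 T : Int) (l : List (List Int))
    (h2 : ∀ r ∈ l, r.length = 2)
    (hs : l.Pairwise (fun x y => pvKey x ≤ pvKey y))
    (hnd : ∀ r ∈ l, pvBeats A0 B0 r = false) :
    ∀ maxb ans, pvLoopA A0 B0 T l maxb ans = ans + l.countP (pvPA l T maxb) := by
  induction l with
  | nil => intro maxb ans; simp [pvLoopA]
  | cons r t ih =>
    intro maxb ans
    obtain ⟨a, b, rfl⟩ := pvLen2 (h2 r List.mem_cons_self)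
    have h2t : ∀ q ∈ t, q.length = 2 := fun q hq => h2 q (List.mem_cons_of_mem _ hq)
    have hR : ∀ q ∈ t, pvKey [a, b] ≤ pvKey q := (List.pairwise_cons.mp hs).1
    have hst : t.Pairwise (fun x y => pvKey x ≤ pvKey y) := (List.pairwise_cons.mp hs).2
    have hndt : ∀ q ∈ t, pvBeats A0 B0 q = false := fun q hq => hnd q (List.mem_cons_of_mem _ hq)
    have hbeat : ¬(A0 < a ∧ B0 < b) := by
      have := hnd _ List.mem_cons_self
      simpa [pvBeats] using this
    have ihh := ih h2t hst hndt
    rw [List.countP_cons]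
    unfold pvLoopA
    simp only [hbeat, if_false]
    by_cases hb : maxb ≤ b
    · rw [if_pos hb, ihh]
      -- head is counted iff T < a + b
      have hhead : pvPA ([a, b] :: t) T maxb [a, b] = decide (T < a + b) := by
        have hanyh : ([a, b] :: t).any (pvBeats a b) = false := by
          rw [List.any_cons, Bool.or_eq_false_iff]
          refine ⟨by simp [pvBeats], ?_⟩
          rw [List.any_eq_false]
          intro q hq
          obtain ⟨c, d, rfl⟩ := pvLen2 (h2t q hq)
          have := (pvKey_le (hR _ hq)).1
          simp [pvBeats]; omega
        simp [pvPA, hanyh, hb]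
      -- tail predicate shifts from maxb to b
      have htail : t.countP (pvPA t T b) = t.countP (pvPA ([a, b] :: t) T maxb) := by
        apply List.countP_congr
        intro q hq
        obtain ⟨c, d, rfl⟩ := pvLen2 (h2t q hq)
        obtain ⟨hca, htie⟩ := pvKey_le (hR _ hq)
        simp only [pvPA, List.any_cons]
        by_cases hbd : b ≤ d
        · have h1 : pvBeats c d [a, b] = false := by simp [pvBeats]; omega
          have h2' : decide (maxb ≤ d) = decide (b ≤ d) := by
            simp only [decide_eq_decide]; omega
          rw [h1, h2', Bool.false_or]
        · have hd' : d < b := by omega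
          have hac : c < a := by
            rcases lt_or_eq_of_le hca with h | h
            · exact h
            · exact absurd (htie h.symm) (by omega)
          have h1 : pvBeats c d [a, b] = true := by simp [pvBeats]; omega
          have h2' : decide (b ≤ d) = false := by simp; omega
          simp [h1, h2']
      rw [hhead, htail]
      by_cases hT : T < a + b <;> simp [hT] <;> omega
    · rw [if_neg hb, ihh]
      have hhead : pvPA ([a, b] :: t) T maxb [a, b] = false := by
        simp [pvPA, hb]
      have htail : t.countP (pvPA t T maxb) = t.countP (pvPA ([a, b] :: t) T maxb) := by
        apply List.countP_congr
        intro q hq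
        obtain ⟨c, d, rfl⟩ := pvLen2 (h2t q hq)
        simp only [pvPA, List.any_cons]
        by_cases hmd : maxb ≤ d
        · have h1 : pvBeats c d [a, b] = false := by simp [pvBeats]; omega
          rw [h1, Bool.false_or]
        · have h2' : decide (maxb ≤ d) = false := by simp; omega
          simp [h2']
      rw [hhead, htail]
      simp

lemma pvAltFold (s : List (List Int)) (T : Int) :
    ∀ (l : List (List Int)), (∀ r ∈ l, r.length = 2) → ∀ init : Int,
    l.foldl (fun rank r =>
      match r with
      | [a, b] => if T < a + b ∧ s.any (pvBeats a b) = false then rank + 1 else rank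
      | _ => rank) init = init + l.countP (pvPB s T) := by
  intro l
  induction l with
  | nil => intro _ init; simp
  | cons r t ih =>
    intro h2 init
    obtain ⟨a, b, rfl⟩ := pvLen2 (h2 r List.mem_cons_self)
    rw [List.foldl_cons, List.countP_cons]
    rw [ih (fun q hq => h2 q (List.mem_cons_of_mem _ hq))]
    simp only [pvPB]
    by_cases h : T < a + b ∧ s.any (pvBeats a b) = false
    · simp only [h]
      simp; omega
    · rw [if_neg h]
      have : (decide (T < a + b) && !(s.any (pvBeats a b))) = false := by
        rcases not_and_or.mp h with h1 | h1
        · simp [h1]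
        · have hb : s.any (pvBeats a b) = true := by
            cases hh : s.any (pvBeats a b) with
            | false => exact absurd hh h1
            | true => rfl
          simp [hb]
      simp [this]

lemma pvCountP_lt {α : Type} (l : List α) (p q : α → Bool)
    (him : ∀ x ∈ l, p x = true → q x = true)
    (hx : ∃ x ∈ l, q x = true ∧ p x = false) :
    l.countP p < l.countP q := by
  induction l with
  | nil => simp at hx
  | cons a t ih =>
    rw [List.countP_cons, List.countP_cons]
    obtain ⟨x, hmem, hq, hp⟩ := hx
    rcases List.mem_cons.mp hmem with rfl | hmem
    · have hle := List.countP_mono_left (l := t) (fun y hy => him y (List.mem_cons_of_mem _ hy))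
      simp [hq, hp]; omega
    · have h1 := ih (fun y hy => him y (List.mem_cons_of_mem _ hy)) ⟨x, hmem, hq, hp⟩
      have hab : (if p a = true then 1 else 0) ≤ (if q a = true then 1 else 0) := by
        by_cases h : p a = true
        · simp [h, him a List.mem_cons_self h]
        · simp [h]
      omega

lemma pvSolution_eq (A0 B0 : Int) (t0 : List (List Int))
    (h2 : ∀ r ∈ ([A0, B0] :: t0), r.length = 2)
    (hnd : ∀ r ∈ PySem.List.sorted ([A0, B0] :: t0) pvKey false, pvBeats A0 B0 r = false) :
    solution ([A0, B0] :: t0) =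
      1 + (PySem.List.sorted ([A0, B0] :: t0) pvKey false).countP
            (pvPA (PySem.List.sorted ([A0, B0] :: t0) pvKey false) (A0 + B0) 0) := by
  unfold solution
  simp only [pvSorted2_eq, PySem.List.pyGetD_zero_cons, pvGet1]
  rw [pvLoopA_nodom A0 B0 (A0 + B0) _
    (fun r hr => h2 r ((PySem.List.mem_sorted _ _ _ _).mp hr))
    (PySem.List.sorted_pairwise _ _) hnd]

lemma pvAlt_eq (A0 B0 : Int) (t0 : List (List Int))
    (h2 : ∀ r ∈ ([A0, B0] :: t0), r.length = 2)
    (hnd : ∀ r ∈ PySem.List.sorted ([A0, B0] :: t0) pvKey false, pvBeats A0 B0 r = false) :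
    solution_alt ([A0, B0] :: t0) =
      1 + (PySem.List.sorted ([A0, B0] :: t0) pvKey false).countP
            (pvPB (PySem.List.sorted ([A0, B0] :: t0) pvKey false) (A0 + B0)) := by
  unfold solution_alt
  simp only [pvSorted2_eq, PySem.List.pyGetD_zero_cons, pvGet1]
  have hany : (PySem.List.sorted ([A0, B0] :: t0) pvKey false).any (pvBeats A0 B0) = false := by
    rw [List.any_eq_false]; intro x hx; simp [hnd x hx]
  rw [hany]
  simp only [Bool.false_eq_true, if_false]
  rw [pvAltFold _ _ _ (fun r hr => h2 r ((PySem.List.mem_sorted _ _ _ _).mp hr))]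

-- ===== VERDICT (by name: the statement is the Claim_ definition above) =====
theorem solution_spec : Claim_unchanged_solution := by
  intro scores hdom hpre
  obtain ⟨hne, h2⟩ := hpre
  intro hnd
  obtain ⟨r0, t0, rfl⟩ : ∃ r0 t0, scores = r0 :: t0 := by
    cases scores with
    | nil => exact absurd rfl hne
    | cons r0 t0 => exact ⟨r0, t0, rfl⟩
  obtain ⟨A0, B0, rfl⟩ := pvLen2 (h2 _ List.mem_cons_self)
  set s := PySem.List.sorted ([A0, B0] :: t0) pvKey false with hs
  by_cases hdomq : s.any (pvBeats A0 B0) = true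
  · -- someone strictly dominates Wanho: both return -1
    have hA : solution ([A0, B0] :: t0) = -1 := by
      unfold solution
      simp only [pvSorted2_eq, PySem.List.pyGetD_zero_cons, pvGet1]
      exact pvLoopA_dom A0 B0 (A0 + B0) s
        (fun r hr => h2 r ((PySem.List.mem_sorted _ _ _ _).mp hr))
        (List.any_eq_true.mp hdomq) 0 1
    have hB : solution_alt ([A0, B0] :: t0) = -1 := by
      unfold solution_alt
      simp only [pvSorted2_eq, PySem.List.pyGetD_zero_cons, pvGet1]
      rw [← hs, hdomq]
      simp
    rw [hA, hB]
  · have hndall : ∀ r ∈ s, pvBeats A0 B0 r = false := by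
      intro r hr
      have hfalse : s.any (pvBeats A0 B0) = false := Bool.eq_false_iff.mpr hdomq
      simpa using List.any_eq_false.mp hfalse r hr
    rw [pvSolution_eq A0 B0 t0 h2 hndall, pvAlt_eq A0 B0 t0 h2 hndall]
    rw [← hs]
    have hc : s.countP (pvPA s (A0 + B0) 0) = s.countP (pvPB s (A0 + B0)) := by
      apply List.countP_congr
      intro q hq
      obtain ⟨c, d, rfl⟩ := pvLen2 (h2 _ ((PySem.List.mem_sorted _ _ _ _).mp hq))
      by_cases hd0 : 0 ≤ d
      · simp [pvPA, pvPB, hd0, Bool.and_comm]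
      · have hpa : pvPA s (A0 + B0) 0 [c, d] = false := by simp [pvPA]; omega
        have hpb : pvPB s (A0 + B0) [c, d] = false := by
          by_contra hh
          have hpb' : pvPB s (A0 + B0) [c, d] = true := by
            cases h : pvPB s (A0 + B0) [c, d] with
            | false => exact absurd h hh
            | true => rfl
          simp only [pvPB, Bool.and_eq_true, Bool.not_eq_true', decide_eq_true_eq] at hpb'
          obtain ⟨hT, hanyq⟩ := hpb'
          apply hnd
          refine ⟨?_, [c, d], (PySem.List.mem_sorted _ _ _ _).mp hq, ?_, ?_, ?_⟩
          · intro r hr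
            obtain ⟨x, y, rfl⟩ := pvLen2 (h2 r hr)
            have := hndall [x, y] ((PySem.List.mem_sorted _ _ _ _).mpr hr)
            simp [pvBeats] at this
            simpa [pvAtt, pvPeer] using this
          · simpa [pvPeer] using (by omega : d < 0)
          · simpa [pvAtt, pvPeer] using hT
          · intro q' hq'
            obtain ⟨x, y, rfl⟩ := pvLen2 (h2 q' hq')
            have := List.any_eq_false.mp hanyq [x, y] ((PySem.List.mem_sorted _ _ _ _).mpr hq')
            simp [pvBeats] at this
            simpa [pvAtt, pvPeer] using this
        rw [hpa, hpb]
    rw [hc]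

theorem solution_changed : Claim_changed_solution := by
  unfold Claim_changed_solution; decide

theorem solution_tight : Claim_exact_solution := by
  intro scores hdom hpre hD
  obtain ⟨hne, h2⟩ := hpre
  obtain ⟨r0, t0, rfl⟩ : ∃ r0 t0, scores = r0 :: t0 := by
    cases scores with
    | nil => exact absurd rfl hne
    | cons r0 t0 => exact ⟨r0, t0, rfl⟩
  obtain ⟨A0, B0, rfl⟩ := pvLen2 (h2 _ List.mem_cons_self)
  obtain ⟨hnodom, w, hwmem, hwneg, hwsum, hwund⟩ := hD
  set s := PySem.List.sorted ([A0, B0] :: t0) pvKey false with hs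
  have hndall : ∀ r ∈ s, pvBeats A0 B0 r = false := by
    intro r hr
    obtain ⟨x, y, rfl⟩ := pvLen2 (h2 r ((PySem.List.mem_sorted _ _ _ _).mp hr))
    have := hnodom [x, y] ((PySem.List.mem_sorted _ _ _ _).mp hr)
    simp [pvAtt, pvPeer] at this
    simp [pvBeats]
    omega
  rw [pvSolution_eq A0 B0 t0 h2 hndall, pvAlt_eq A0 B0 t0 h2 hndall, ← hs]
  obtain ⟨c, d, rfl⟩ := pvLen2 (h2 w hwmem)
  simp [pvAtt, pvPeer] at hwneg hwsum
  have hcount : s.countP (pvPA s (A0 + B0) 0) < s.countP (pvPB s (A0 + B0)) := by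
    apply pvCountP_lt
    · intro x hx hpx
      obtain ⟨a, b, rfl⟩ := pvLen2 (h2 x ((PySem.List.mem_sorted _ _ _ _).mp hx))
      simp only [pvPA, Bool.and_eq_true, decide_eq_true_eq] at hpx
      simp only [pvPB, Bool.and_eq_true, decide_eq_true_eq]
      exact ⟨by exact_mod_cast hpx.2, hpx.1.2⟩
    · refine ⟨[c, d], (PySem.List.mem_sorted _ _ _ _).mpr hwmem, ?_, ?_⟩
      · have hanyw : s.any (pvBeats c d) = false := by
          rw [List.any_eq_false]
          intro x hx
          obtain ⟨a, b, rfl⟩ := pvLen2 (h2 x ((PySem.List.mem_sorted _ _ _ _).mp hx))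
          have := hwund [a, b] ((PySem.List.mem_sorted _ _ _ _).mp hx)
          simp [pvAtt, pvPeer] at this
          simp [pvBeats]
          omega
        simp only [pvPB, hanyw]
        simp
        omega
      · simp only [pvPA]
        simp
        omega
  omega
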